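-- pv_equiv track=rewrite | github.com/TomHosk/StegH | modules/bitmap.py | get_pad_masks
-- ===== SOURCE A (Python) =====
-- def get_pad_masks(rgba_masks, bit_depth):
--     """Creates a list of bitmasks with each representing a padding bit
--     within the pixel.
--
--     Arguments:
--         rgba_masks: list
--             List of rgba bitfields of channels used by the bitmap, as
--             integers.
--         bit_depth: integer
--             The bit depth of the bitmap.
--     Returns:
--         List of bitmasks for each pixel padding bit, as integers.
--     """
--     pad_masks = []
--     rgba_mask = 0
--     for mask in rgba_masks:
--         rgba_mask ^= mask
--     for i in range(bit_depth):
--         bitmask = 1 << i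
--         if bitmask & rgba_mask == 0:
--             pad_masks.append(bitmask)
--     return pad_masks
-- ===== SOURCE B (Python) =====
-- def get_pad_masks(rgba_masks, bit_depth):
--     """Alternative: materialise all padding bits as one integer
--     (full-width mask AND NOT channel mask) and peel off its set bits
--     directly with the lowest-set-bit trick (Kernighan), instead of
--     testing each of the bit_depth positions."""
--     rgba_mask = 0
--     for mask in rgba_masks:
--         rgba_mask ^= mask
--     pad = ((1 << bit_depth) - 1) & ~rgba_mask if bit_depth > 0 else 0
--     pad_masks = []
--     while pad > 0:
--         pad_masks.append(pad & -pad)   # lowest set bit, already a power of two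
--         pad &= pad - 1                 # clear it
--     return pad_masks
-- ===== Notes on version B (the rewrite author's own statement) =====
-- stated objective: alternative
-- what changed: B never iterates over bit positions: it materialises all padding bits as the single integer ((1<<bit_depth)-1) & ~xor(rgba_masks) and peels its set bits off in ascending order with the lowest-set-bit trick (pad & -pad, then pad &= pad-1), looping once per padding bit instead of once per bit position.
import Mathlib
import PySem

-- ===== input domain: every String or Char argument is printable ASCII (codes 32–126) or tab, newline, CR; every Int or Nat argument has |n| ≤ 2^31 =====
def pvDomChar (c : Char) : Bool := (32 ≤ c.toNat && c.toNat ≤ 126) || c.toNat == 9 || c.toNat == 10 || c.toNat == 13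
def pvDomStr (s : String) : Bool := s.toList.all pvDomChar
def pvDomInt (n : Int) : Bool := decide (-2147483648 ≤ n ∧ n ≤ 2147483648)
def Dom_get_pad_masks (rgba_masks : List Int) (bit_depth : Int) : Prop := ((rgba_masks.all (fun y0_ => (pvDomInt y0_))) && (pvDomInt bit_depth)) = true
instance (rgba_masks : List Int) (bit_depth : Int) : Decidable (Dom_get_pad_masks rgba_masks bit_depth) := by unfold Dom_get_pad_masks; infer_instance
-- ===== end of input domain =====

-- B collects the padding bits into a single integer (full-width mask & ~rgba_mask) and
-- peels off its set bits in ascending order with the lowest-set-bit trick, instead of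
-- testing every bit position.


-- ===== PORT A =====
-- 'for i in range(bit_depth)' always yields i ≥ 0, so '1 << i' is the Int×Nat shift
-- 'Int.shiftLeft 1 i.toNat' (Lean's '<<<' at Int × Nat) exactly.
def get_pad_masks (rgba_masks : List Int) (bit_depth : Int) : List Int :=
  let rgba_mask := rgba_masks.foldl (fun acc mask => PySem.Int.bxor acc mask) 0
  (PySem.List.pyRange 0 bit_depth 1).foldl
    (fun pad_masks i =>
      let bitmask := Int.shiftLeft 1 i.toNat
      if PySem.Int.band bitmask rgba_mask = 0 then pad_masks ++ [bitmask] else pad_masks)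
    []

-- ===== PORT B =====
-- termination lemma for lowBits, cited by name in its decreasing_by
theorem lowBits_dec (pad : Int) (h : 0 < pad) : (PySem.Int.band pad (pad - 1)).toNat < pad.toNat := by
  have h1 : PySem.Int.band pad (pad - 1) = ((pad.toNat &&& (pad - 1).toNat : Nat) : Int) := by
    simp only [PySem.Int.band]
    rw [if_pos (show (0:Int) ≤ pad from by omega), if_pos (show (0:Int) ≤ pad - 1 from by omega)]
  have h2 := Nat.and_le_right (n := pad.toNat) (m := (pad - 1).toNat)
  omega

-- the 'while pad > 0' loop of Source B: emit the lowest set bit (pad & -pad), clear it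
-- (pad &= pad - 1); PySem.Int.band is Python's '&' including the negative operand.
def lowBits (pad : Int) : List Int :=
  if h : 0 < pad then
    PySem.Int.band pad (-pad) :: lowBits (PySem.Int.band pad (pad - 1))
  else []
termination_by pad.toNat
decreasing_by exact lowBits_dec pad h

-- 'bit_depth > 0' guards '1 << bit_depth' (Python raises on a negative shift count)
def get_pad_masks_alt (rgba_masks : List Int) (bit_depth : Int) : List Int :=
  let rgba_mask := rgba_masks.foldl (fun acc mask => PySem.Int.bxor acc mask) 0
  let pad : Int :=
    if 0 < bit_depth then
      PySem.Int.band (Int.shiftLeft 1 bit_depth.toNat - 1) (Int.not rgba_mask)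
    else 0
  lowBits pad

-- ===== PRECONDITION & SPEC =====
def Spec_get_pad_masks (rgba_masks : List Int) (bit_depth : Int) (out : List Int) : Prop := out = get_pad_masks_alt rgba_masks bit_depth
instance (rgba_masks : List Int) (bit_depth : Int) (out : List Int) : Decidable (Spec_get_pad_masks rgba_masks bit_depth out) := by unfold Spec_get_pad_masks; infer_instance

-- ===== CLAIM (what is proved, stated in full; the proofs are below) =====
def Claim_equal_get_pad_masks : Prop := ∀ (rgba_masks : List Int) (bit_depth : Int), Dom_get_pad_masks rgba_masks bit_depth → Spec_get_pad_masks rgba_masks bit_depth (get_pad_masks rgba_masks bit_depth)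

-- ===== LEMMAS AND PROOFS =====

theorem shiftLeft_eq_notation (a : Int) (s : Nat) : Int.shiftLeft a s = a <<< s := rfl

theorem int_not_eq (m : Int) : Int.not m = -m - 1 := by
  cases m with
  | ofNat n => simp only [Int.not, Int.negSucc_eq, Int.ofNat_eq_natCast]; ring
  | negSucc n => simp only [Int.not, Int.negSucc_eq, Int.ofNat_eq_natCast]; ring

-- A's append-if loop as a filterMap
theorem foldl_if_append {α β : Type} (c : α → Prop) [DecidablePred c] (f : α → β) :
    ∀ (l : List α) (acc : List β),
      l.foldl (fun a x => if c x then a ++ [f x] else a) acc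
        = acc ++ l.filterMap (fun x => if c x then some (f x) else none) := by
  intro l
  induction l with
  | nil => intro acc; simp
  | cons x xs ih =>
    intro acc
    simp only [List.foldl_cons, List.filterMap_cons]
    by_cases h : c x
    · simp [h, ih]
    · simp [h, ih]

-- complement within a width: bit i of (2^k - 1 - r) is the negation of bit i of r
theorem sub_testBit : ∀ (i k r : Nat), r < 2 ^ k → i < k →
    (2 ^ k - 1 - r).testBit i = !(r.testBit i) := by
  intro i
  induction i with
  | zero =>
    intro k r hr hik
    obtain ⟨k', rfl⟩ : ∃ k', k = k' + 1 := ⟨k - 1, by omega⟩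
    have h2 : 2 ^ (k' + 1) = 2 * 2 ^ k' := by rw [pow_succ]; ring
    simp only [Nat.testBit_zero]
    rw [← decide_not]
    apply decide_eq_decide.mpr
    omega
  | succ i ih =>
    intro k r hr hik
    obtain ⟨k', rfl⟩ : ∃ k', k = k' + 1 := ⟨k - 1, by omega⟩
    have h2 : 2 ^ (k' + 1) = 2 * 2 ^ k' := by rw [pow_succ]; ring
    rw [Nat.testBit_add_one, Nat.testBit_add_one]
    have hq : (2 ^ (k' + 1) - 1 - r) / 2 = 2 ^ k' - 1 - r / 2 := by omega
    rw [hq]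
    exact ih k' (r / 2) (by omega) (by omega)

-- Kernighan's clear-lowest-bit step, on Nat: p & (p-1) removes the lowest set bit
theorem land_pred : ∀ (i a : Nat), (2 ^ i * (2 * a + 1)) &&& (2 ^ i * (2 * a + 1) - 1) = 2 ^ (i + 1) * a := by
  intro i
  induction i with
  | zero =>
    intro a
    rw [show (2:Nat) ^ (0 + 1) * a = 2 * a from by ring]
    simp only [pow_zero, one_mul]
    rw [show 2 * a + 1 - 1 = 2 * a from by omega]
    apply Nat.eq_of_testBit_eq
    intro j
    cases j with
    | zero =>
      rw [Nat.testBit_and, Nat.testBit_zero, Nat.testBit_zero]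
      have h1 : (2 * a + 1) % 2 = 1 := by omega
      have h2 : (2 * a) % 2 = 0 := by omega
      simp [h1, h2]
    | succ j =>
      rw [Nat.testBit_and]
      simp only [Nat.testBit_add_one]
      rw [show (2 * a + 1) / 2 = a from by omega, show (2 * a) / 2 = a from by omega, Bool.and_self]
  | succ i ih =>
    intro a
    have hq : 0 < 2 ^ i * (2 * a + 1) := by positivity
    rw [show 2 ^ (i + 1) * (2 * a + 1) = 2 * (2 ^ i * (2 * a + 1)) from by ring,
        show 2 ^ (i + 1 + 1) * a = 2 * (2 ^ (i + 1) * a) from by ring, ← ih a]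
    set q := 2 ^ i * (2 * a + 1) with hqdef
    apply Nat.eq_of_testBit_eq
    intro j
    cases j with
    | zero =>
      rw [Nat.testBit_and, Nat.testBit_zero, Nat.testBit_zero]
      have h1 : (2 * q) % 2 = 0 := by omega
      have h2 : (2 * (q &&& (q - 1))) % 2 = 0 := by omega
      simp [h1, h2]
    | succ j =>
      rw [Nat.testBit_and]
      simp only [Nat.testBit_add_one]
      rw [show (2 * q) / 2 = q from by omega, show (2 * q - 1) / 2 = q - 1 from by omega,
          show (2 * (q &&& (q - 1))) / 2 = q &&& (q - 1) from by omega, Nat.testBit_and]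

-- removing the lowest set bit removes exactly the head of the ascending bit list
theorem bits_cons (i a k : Nat) (hik : i < k) :
    (List.range k).filterMap (fun j => if (2 ^ i * (2 * a + 1)).testBit j then some ((2:Int) ^ j) else none)
      = (2:Int) ^ i :: (List.range k).filterMap (fun j => if (2 ^ (i + 1) * a).testBit j then some ((2:Int) ^ j) else none) := by
  have tbp : ∀ j, (2 ^ i * (2 * a + 1)).testBit j = (decide (i ≤ j) && (2 * a + 1).testBit (j - i)) := by
    intro j; rw [mul_comm]; exact Nat.testBit_mul_two_pow _ _ _
  have tbr : ∀ j, (2 ^ (i + 1) * a).testBit j = (decide (i + 1 ≤ j) && a.testBit (j - (i + 1))) := by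
    intro j; rw [mul_comm]; exact Nat.testBit_mul_two_pow _ _ _
  obtain ⟨d, rfl⟩ : ∃ d, k = (i + 1) + d := ⟨k - (i + 1), by omega⟩
  rw [List.range_add, List.filterMap_append, List.filterMap_append]
  have hp1 : (List.range (i + 1)).filterMap (fun j => if (2 ^ i * (2 * a + 1)).testBit j then some ((2:Int) ^ j) else none) = [(2:Int) ^ i] := by
    rw [List.range_succ, List.filterMap_append]
    have h0 : (List.range i).filterMap (fun j => if (2 ^ i * (2 * a + 1)).testBit j then some ((2:Int) ^ j) else none) = [] := by
      apply List.filterMap_eq_nil_iff.mpr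
      intro j hj
      have hji : j < i := List.mem_range.mp hj
      simp [tbp j, show ¬ i ≤ j from by omega]
    have hi : (2 ^ i * (2 * a + 1)).testBit i = true := by
      rw [tbp i]
      simp [Nat.testBit_zero, show (2 * a + 1) % 2 = 1 from by omega]
    simp [h0, hi]
  have hr1 : (List.range (i + 1)).filterMap (fun j => if (2 ^ (i + 1) * a).testBit j then some ((2:Int) ^ j) else none) = [] := by
    apply List.filterMap_eq_nil_iff.mpr
    intro j hj
    have hji : j < i + 1 := List.mem_range.mp hj
    simp [tbr j, show ¬ i + 1 ≤ j from by omega]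
  have htail : (List.map (fun x => i + 1 + x) (List.range d)).filterMap (fun j => if (2 ^ i * (2 * a + 1)).testBit j then some ((2:Int) ^ j) else none)
      = (List.map (fun x => i + 1 + x) (List.range d)).filterMap (fun j => if (2 ^ (i + 1) * a).testBit j then some ((2:Int) ^ j) else none) := by
    apply List.filterMap_congr
    intro j hj
    obtain ⟨x, _, rfl⟩ := List.mem_map.mp hj
    have heq : (2 ^ i * (2 * a + 1)).testBit (i + 1 + x) = (2 ^ (i + 1) * a).testBit (i + 1 + x) := by
      rw [tbp, tbr]
      have h1 : i ≤ i + 1 + x := by omega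
      have h2 : i + 1 ≤ i + 1 + x := by omega
      simp only [h1, h2, decide_true, Bool.true_and]
      rw [show i + 1 + x - i = x + 1 from by omega, Nat.testBit_add_one,
          show (2 * a + 1) / 2 = a from by omega, show i + 1 + x - (i + 1) = x from by omega]
    rw [heq]
  rw [hp1, hr1, htail]
  simp

-- B's loop emits exactly the set bits of its nonnegative argument, ascending
theorem lowBits_spec : ∀ (p : Nat), ∀ (k : Nat), p < 2 ^ k →
    lowBits (↑p) = (List.range k).filterMap (fun j => if p.testBit j then some ((2:Int) ^ j) else none) := by
  intro p
  induction p using Nat.strong_induction_on with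
  | _ p ih =>
    intro k hk
    by_cases h0 : p = 0
    · subst h0
      rw [lowBits]
      simp [Nat.zero_testBit]
    · obtain ⟨i, m, hm, hpm⟩ := Nat.exists_eq_two_pow_mul_odd h0
      obtain ⟨a, rfl⟩ := hm
      subst hpm
      have hpos : 0 < 2 ^ i * (2 * a + 1) := by positivity
      have h2i : 0 < 2 ^ i := Nat.two_pow_pos i
      have hsum : 2 ^ (i + 1) * a + 2 ^ i = 2 ^ i * (2 * a + 1) := by ring
      have hik : i < k := by
        by_contra hc
        have : 2 ^ k ≤ 2 ^ i := Nat.pow_le_pow_right (by norm_num) (by omega)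
        have : 2 ^ i ≤ 2 ^ i * (2 * a + 1) := Nat.le_mul_of_pos_right _ (by omega)
        omega
      have hland := land_pred i a
      have hrlt : 2 ^ (i + 1) * a < 2 ^ i * (2 * a + 1) := by omega
      rw [lowBits]
      rw [dif_pos (show (0:Int) < ((2 ^ i * (2 * a + 1) : Nat) : Int) from by exact_mod_cast hpos)]
      have hb1 : PySem.Int.band ((2 ^ i * (2 * a + 1) : Nat) : Int) (((2 ^ i * (2 * a + 1) : Nat) : Int) - 1)
          = ((2 ^ (i + 1) * a : Nat) : Int) := by
        rw [show (((2 ^ i * (2 * a + 1) : Nat) : Int) - 1) = ((2 ^ i * (2 * a + 1) - 1 : Nat) : Int) from by omega,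
            PySem.Int.band_natCast, hland]
      have hb2 : PySem.Int.band ((2 ^ i * (2 * a + 1) : Nat) : Int) (-((2 ^ i * (2 * a + 1) : Nat) : Int)) = (2:Int) ^ i := by
        simp only [PySem.Int.band]
        rw [if_pos (show (0:Int) ≤ ((2 ^ i * (2 * a + 1) : Nat) : Int) from by positivity),
            if_neg (show ¬ (0:Int) ≤ -((2 ^ i * (2 * a + 1) : Nat) : Int) from by omega)]
        rw [show (-(-((2 ^ i * (2 * a + 1) : Nat) : Int)) - 1).toNat = 2 ^ i * (2 * a + 1) - 1 from by omega,
            show (((2 ^ i * (2 * a + 1) : Nat) : Int)).toNat = 2 ^ i * (2 * a + 1) from by omega,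
            hland,
            show 2 ^ i * (2 * a + 1) - 2 ^ (i + 1) * a = 2 ^ i from by omega]
        push_cast
        ring
      rw [hb1, hb2, ih (2 ^ (i + 1) * a) hrlt k (by omega)]
      exact (bits_cons i a k hik).symm

-- the padding integer of B, as a natural number
def padNat (m : Int) (k : Nat) : Nat :=
  if 0 ≤ m then 2 ^ k - 1 - m.toNat % 2 ^ k else (2 ^ k - 1) &&& (-m - 1).toNat

theorem padNat_lt (m : Int) (k : Nat) : padNat m k < 2 ^ k := by
  have hk : 0 < 2 ^ k := Nat.two_pow_pos k
  unfold padNat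
  split
  · omega
  · have := Nat.and_le_left (n := 2 ^ k - 1) (m := (-m - 1).toNat)
    omega

-- B's pad equals padNat when bit_depth > 0
theorem pad_eq (m : Int) (k : Nat) :
    PySem.Int.band ((2 : Int) ^ k - 1) (Int.not m) = ((padNat m k : Nat) : Int) := by
  have hk : (1 : Nat) ≤ 2 ^ k := Nat.one_le_two_pow
  have hcast : ((2 : Int) ^ k - 1) = (((2 ^ k - 1 : Nat) : Nat) : Int) := by push_cast [hk]; ring
  rw [int_not_eq, hcast]
  by_cases hm : 0 ≤ m
  · have hnot : ¬ (0 ≤ -m - 1) := by omega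
    have hge : (0 : Int) ≤ ((2 ^ k - 1 : Nat) : Int) := by positivity
    simp only [PySem.Int.band, hge, hnot, if_true, if_false]
    have h1 : (((2 ^ k - 1 : Nat) : Int)).toNat = 2 ^ k - 1 := Int.toNat_natCast _
    have h2 : (-(-m - 1) - 1).toNat = m.toNat := by omega
    rw [h1, h2]
    have h3 : (2 ^ k - 1) &&& m.toNat = m.toNat % 2 ^ k := by
      rw [Nat.and_comm]
      exact Nat.and_two_pow_sub_one_eq_mod m.toNat k
    rw [h3]
    unfold padNat
    rw [if_pos hm]
  · have hyes : (0 : Int) ≤ -m - 1 := by omega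
    have hge : (0 : Int) ≤ ((2 ^ k - 1 : Nat) : Int) := by positivity
    simp only [PySem.Int.band, hge, hyes, if_true]
    have h1 : (((2 ^ k - 1 : Nat) : Int)).toNat = 2 ^ k - 1 := Int.toNat_natCast _
    rw [h1]
    unfold padNat
    rw [if_neg hm]

-- A's bit test agrees with the corresponding bit of padNat, below the width
theorem cond_iff (m : Int) (k i : Nat) (hik : i < k) :
    (PySem.Int.band ((2 : Int) ^ i) m = 0) ↔ (padNat m k).testBit i = true := by
  have hp : (0 : Int) ≤ (2 : Int) ^ i := by positivity
  have hcast : ((2 : Int) ^ i) = (((2 ^ i : Nat) : Nat) : Int) := by push_cast; ring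
  have hpowpos : 0 < 2 ^ i := Nat.two_pow_pos i
  by_cases hm : 0 ≤ m
  · have hmm : m = ((m.toNat : Nat) : Int) := by omega
    have hpad : (padNat m k).testBit i = !(m.toNat.testBit i) := by
      unfold padNat
      rw [if_pos hm]
      rw [sub_testBit i k (m.toNat % 2 ^ k) (Nat.mod_lt _ (Nat.two_pow_pos k)) hik]
      rw [Nat.testBit_mod_two_pow]
      simp [hik]
    have hband : PySem.Int.band ((2 : Int) ^ i) m = ((2 ^ i &&& m.toNat : Nat) : Int) := by
      rw [hcast]
      conv_lhs => rw [hmm]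
      rw [PySem.Int.band_natCast]
    rw [hband, hpad]
    have hand : 2 ^ i &&& m.toNat = (m.toNat.testBit i).toNat * 2 ^ i := by
      rw [Nat.and_comm, Nat.and_two_pow]
    rw [hand]
    cases hb : m.toNat.testBit i
    · simp
    · simp only [Bool.toNat_true, Nat.one_mul, Bool.not_true]
      constructor
      · intro h
        exfalso
        have h' : (2 : Nat) ^ i = 0 := by exact_mod_cast h
        omega
      · intro h; cases h
  · have hno : ¬ (0 ≤ m) := hm
    unfold padNat
    rw [if_neg hm]
    rw [Nat.testBit_and, Nat.testBit_two_pow_sub_one]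
    simp only [hik, decide_true, Bool.true_and]
    simp only [PySem.Int.band, hp, hno, if_true, if_false]
    have h1 : ((2 : Int) ^ i).toNat = 2 ^ i := by
      rw [hcast]; exact Int.toNat_natCast _
    rw [h1]
    have hand : 2 ^ i &&& (-m - 1).toNat = ((-m - 1).toNat.testBit i).toNat * 2 ^ i := by
      rw [Nat.and_comm, Nat.and_two_pow]
    cases hb : (-m - 1).toNat.testBit i
    · simp only [hand, hb, Bool.toNat_false, Nat.zero_mul, Nat.sub_zero]
      constructor
      · intro h
        exfalso
        have h' : (2 : Nat) ^ i = 0 := by exact_mod_cast h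
        omega
      · intro h; cases h
    · simp only [hand, hb, Bool.toNat_true, Nat.one_mul, Nat.sub_self]
      simp

-- the main equality, with no hypotheses at all
theorem main_eq (rgba_masks : List Int) (bit_depth : Int) :
    get_pad_masks rgba_masks bit_depth = get_pad_masks_alt rgba_masks bit_depth := by
  simp only [get_pad_masks, get_pad_masks_alt]
  set m := rgba_masks.foldl (fun acc mask => PySem.Int.bxor acc mask) 0 with hm
  by_cases hbd : 0 < bit_depth
  · set k := bit_depth.toNat with hk
    have hfull : (if 0 < bit_depth then PySem.Int.band (Int.shiftLeft 1 bit_depth.toNat - 1) (Int.not m) else 0)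
        = ((padNat m k : Nat) : Int) := by
      rw [if_pos hbd, shiftLeft_eq_notation, Int.shiftLeft_eq, one_mul]
      exact pad_eq m k
    rw [hfull, lowBits_spec (padNat m k) k (padNat_lt m k)]
    rw [PySem.List.pyRange_one]
    have hsub : ((bit_depth - 0).toNat) = k := by omega
    rw [hsub]
    have hmap : (List.range k).map (fun i : Nat => (0 : Int) + (i : Int))
        = (List.range k).map (fun i : Nat => (i : Int)) := by simp
    rw [hmap, List.foldl_map]
    rw [foldl_if_append (fun i : Nat => PySem.Int.band (Int.shiftLeft 1 ((i : Int)).toNat) m = 0)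
        (fun i : Nat => Int.shiftLeft 1 ((i : Int)).toNat) (List.range k) []]
    rw [List.nil_append]
    apply List.filterMap_congr
    intro i hi
    have hik : i < k := List.mem_range.mp hi
    have hx : ((i : Int)).toNat = i := Int.toNat_natCast i
    have hpow : Int.shiftLeft 1 i = (2 : Int) ^ i := by
      rw [shiftLeft_eq_notation, Int.shiftLeft_eq, one_mul]
    rw [hx, hpow]
    by_cases hc : PySem.Int.band ((2 : Int) ^ i) m = 0
    · have ht : (padNat m k).testBit i = true := (cond_iff m k i hik).mp hc
      simp [hc, ht]
    · have ht : (padNat m k).testBit i = false := by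
        cases hx2 : (padNat m k).testBit i
        · rfl
        · exact absurd ((cond_iff m k i hik).mpr hx2) hc
      simp [hc, ht]
  · have hnil : PySem.List.pyRange 0 bit_depth 1 = [] :=
      PySem.List.pyRange_one_eq_nil (by omega)
    rw [hnil]
    simp only [List.foldl_nil]
    rw [if_neg hbd, lowBits]
    simp

-- ===== VERDICT (by name: the statement is the Claim_ definition above) =====
theorem get_pad_masks_spec : Claim_equal_get_pad_masks := by
  intro rgba_masks bit_depth _
  unfold Spec_get_pad_masks
  exact main_eq rgba_masks bit_depth
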